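-- pv_equiv track=rewrite | github.com/pendant-k/-problem-solving | 백준/Silver/1316. 그룹 단어 체커/그룹 단어 체커.py | solution
-- ===== SOURCE A (Python) =====
-- def solution(ls):
--     cnt = len(ls)
--     for word in ls:
--         for i in range(len(word) - 1):
--             if word[i] == word[i+1]:
--                 continue
--             # word[i] != word[i+1]
--             else:
--                 if word[i] in word[i+1:]:
--                     cnt -= 1
--                     break
--     return cnt
-- ===== SOURCE B (Python) =====
-- def solution(ls):
--     cnt = 0
--     for word in ls:
--         reduced = []
--         prev = None
--         for ch in word:
--             if ch != prev:
--                 reduced.append(ch)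
--                 prev = ch
--         if len(reduced) == len(set(reduced)):
--             cnt += 1
--     return cnt
-- ===== Notes on version B (the rewrite author's own statement) =====
-- stated objective: simpler
-- what changed: A decides each word by scanning adjacent pairs and, at the first unequal pair, searching the whole remaining suffix for the left character (early-exit O(L^2)); B instead collapses each word's contiguous runs into a reduced list in one pass and counts the word iff the reduced list has no duplicates (len(reduced) == len(set(reduced))), incrementing a counter rather than decrementing from len(ls).
import Mathlib
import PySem

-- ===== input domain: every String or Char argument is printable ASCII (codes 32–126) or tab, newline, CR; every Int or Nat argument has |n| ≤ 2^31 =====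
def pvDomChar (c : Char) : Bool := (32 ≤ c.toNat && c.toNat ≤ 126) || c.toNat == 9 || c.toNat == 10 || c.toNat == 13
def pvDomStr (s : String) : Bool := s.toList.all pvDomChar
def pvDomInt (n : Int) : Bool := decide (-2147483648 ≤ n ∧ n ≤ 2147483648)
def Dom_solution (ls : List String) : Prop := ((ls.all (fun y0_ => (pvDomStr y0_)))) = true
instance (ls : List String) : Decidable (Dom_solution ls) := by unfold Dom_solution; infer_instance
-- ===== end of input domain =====

-- B replaces A's early-exit O(L^2) suffix-membership scan per word by an O(L) run-length
-- collapse followed by a duplicate check (len(reduced) == len(set(reduced))): simpler one-pass logic.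

-- ===== PORT A =====
-- inner loop of A: scan adjacent pairs word[i], word[i+1]; on the first unequal pair whose
-- left char reappears in the suffix word[i+1:], report a violation (the 'break' + 'cnt -= 1').
def aScan : List Char → Bool
  | c1 :: c2 :: rest =>
    if c1 = c2 then aScan (c2 :: rest)
    else if (c2 :: rest).contains c1 then true else aScan (c2 :: rest)
  | _ => false

def solution (ls : List String) : Int :=
  ls.foldl (fun cnt w => if aScan w.toList then cnt - 1 else cnt) (ls.length : Int)

-- ===== PORT B =====
-- one step of B's inner loop: state = (reduced, prev); append ch when it differs from prev
def bStep (st : List Char × Option Char) (ch : Char) : List Char × Option Char :=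
  if some ch ≠ st.2 then (st.1 ++ [ch], some ch) else st

def bReduce (w : List Char) : List Char := (w.foldl bStep ([], none)).1

def bGood (w : List Char) : Bool :=
  decide ((bReduce w).length = (PySem.Set.ofList (bReduce w)).length)

def solution_alt (ls : List String) : Int :=
  ls.foldl (fun cnt w => if bGood w.toList then cnt + 1 else cnt) 0

-- ===== PRECONDITION & SPEC =====
def Spec_solution (ls : List String) (out : Int) : Prop := out = solution_alt ls
instance (ls : List String) (out : Int) : Decidable (Spec_solution ls out) := by unfold Spec_solution; infer_instance

-- ===== CLAIM (what is proved, stated in full; the proofs are below) =====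
def Claim_equal_solution : Prop := ∀ (ls : List String), Dom_solution ls → Spec_solution ls (solution ls)

-- ===== LEMMAS AND PROOFS =====

-- run-length collapse after a kept character c (proof-side characterisation of B's loop)
def dedupFrom (c : Char) : List Char → List Char
  | [] => []
  | d :: t => if d = c then dedupFrom c t else d :: dedupFrom d t

def dedupRun : List Char → List Char
  | [] => []
  | c :: t => c :: dedupFrom c t

theorem foldl_bStep_eq (cs : List Char) : ∀ (acc : List Char) (c : Char),
    (cs.foldl bStep (acc, some c)).1 = acc ++ dedupFrom c cs := by
  induction cs with
  | nil => intro acc c; simp [dedupFrom]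
  | cons d t ih =>
    intro acc c
    by_cases h : d = c
    · subst h
      simp [bStep, dedupFrom, ih]
    · simp only [List.foldl_cons, bStep, dedupFrom]
      rw [if_pos (by simpa using h), if_neg h, ih]
      simp

theorem bReduce_eq (w : List Char) : bReduce w = dedupRun w := by
  cases w with
  | nil => rfl
  | cons c t =>
    have h1 : bStep ([], none) c = ([c], some c) := by simp [bStep]
    simp only [bReduce, dedupRun, List.foldl_cons, h1]
    simpa using foldl_bStep_eq t [c] c

theorem mem_dedupFrom (cs : List Char) : ∀ (c x : Char), x ≠ c →
    (x ∈ dedupFrom c cs ↔ x ∈ cs) := by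
  induction cs with
  | nil => intro c x _; simp [dedupFrom]
  | cons d t ih =>
    intro c x hxc
    by_cases h : d = c
    · subst h
      have hd : dedupFrom d (d :: t) = dedupFrom d t := by simp [dedupFrom]
      rw [hd, ih d x hxc]
      simp [List.mem_cons, hxc]
    · have hd : dedupFrom c (d :: t) = d :: dedupFrom d t := by simp [dedupFrom, h]
      rw [hd]
      by_cases hxd : x = d
      · simp [hxd]
      · simp only [List.mem_cons]
        rw [ih d x hxd]

theorem aScan_iff (cs : List Char) : aScan cs = true ↔ ¬ (dedupRun cs).Nodup := by
  induction cs with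
  | nil => simp [aScan, dedupRun]
  | cons a rest ih =>
    cases rest with
    | nil => simp [aScan, dedupRun, dedupFrom]
    | cons b t =>
      by_cases hab : a = b
      · subst hab
        have h1 : aScan (a :: a :: t) = aScan (a :: t) := by simp [aScan]
        have h2 : dedupRun (a :: a :: t) = dedupRun (a :: t) := by
          simp [dedupRun, dedupFrom]
        rw [h1, h2]; exact ih
      · have hrun : dedupRun (a :: b :: t) = a :: dedupRun (b :: t) := by
          simp [dedupRun, dedupFrom, if_neg (Ne.symm hab)]
        have hmemIff : a ∈ dedupRun (b :: t) ↔ a ∈ t := by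
          simp only [dedupRun, List.mem_cons]
          rw [mem_dedupFrom t b a hab]
          simp [hab]
        rw [hrun]
        by_cases hmem : a ∈ t
        · have hcont : (b :: t).contains a = true := by simp [hmem]
          rw [show aScan (a :: b :: t) = true from by
            simp [aScan, hab]; exact Or.inl hmem]
          simp only [true_iff]
          intro hnd
          exact (List.nodup_cons.mp hnd).1 (hmemIff.mpr hmem)
        · have hcont : (b :: t).contains a = false := by simp [hmem, hab]
          rw [show aScan (a :: b :: t) = aScan (b :: t) from by simp [aScan, hab, hmem]]
          rw [ih, List.nodup_cons]
          have : a ∉ dedupRun (b :: t) := fun h => hmem (hmemIff.mp h)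
          tauto

theorem foldl_add_sublist (l : List Char) : ∀ (s : List Char),
    ∃ t, l.foldl PySem.Set.add s = s ++ t ∧ t.Sublist l := by
  induction l with
  | nil => intro s; exact ⟨[], by simp⟩
  | cons c l ih =>
    intro s
    by_cases h : PySem.Set.contains s c
    · have hc : c ∈ s := by simpa [PySem.Set.contains] using h
      have hs : PySem.Set.add s c = s := by simp [PySem.Set.add, PySem.Set.contains, hc]
      obtain ⟨t, ht, hsub⟩ := ih s
      exact ⟨t, by simpa [hs] using ht, hsub.cons c⟩
    · have hc : c ∉ s := by simpa [PySem.Set.contains] using h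
      have hs : PySem.Set.add s c = s ++ [c] := by simp [PySem.Set.add, PySem.Set.contains, hc]
      obtain ⟨t, ht, hsub⟩ := ih (s ++ [c])
      exact ⟨c :: t, by simp [hs, ht], hsub.cons₂ c⟩

theorem length_ofList_iff (l : List Char) :
    (l.length = (PySem.Set.ofList l).length) ↔ l.Nodup := by
  constructor
  · intro h
    obtain ⟨t, ht, hsub⟩ := foldl_add_sublist l []
    have heq : PySem.Set.ofList l = t := by
      rw [PySem.Set.ofList_eq_foldl, ht]; simp
    have : PySem.Set.ofList l = l := by
      rw [heq]
      exact hsub.eq_of_length (by rw [← heq, ← h])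
    rw [← this]
    exact PySem.Set.nodup_ofList l
  · intro h
    rw [PySem.Set.ofList_eq_self_of_nodup l h]

theorem bGood_iff (w : List Char) : bGood w = true ↔ (dedupRun w).Nodup := by
  unfold bGood
  rw [bReduce_eq, decide_eq_true_iff]
  exact length_ofList_iff (dedupRun w)

theorem aScan_eq_not_bGood (w : List Char) : aScan w = !bGood w := by
  cases h : bGood w
  · simp only [Bool.not_false]
    have := (bGood_iff w).not.mpr ∘ fun hh => hh
    rw [aScan_iff]
    intro hnd
    exact absurd ((bGood_iff w).mpr hnd) (by simp [h])
  · simp only [Bool.not_true]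
    by_contra hb
    have : aScan w = true := by simpa using hb
    exact (aScan_iff w).mp this ((bGood_iff w).mp h)

theorem foldlA_eq (ls : List String) : ∀ (c : Int),
    ls.foldl (fun cnt w => if aScan w.toList then cnt - 1 else cnt) c
      = c - (ls.countP (fun w => aScan w.toList) : Int) := by
  induction ls with
  | nil => intro c; simp
  | cons w ls ih =>
    intro c
    by_cases h : aScan w.toList
    · simp [h, ih]; ring
    · simp [h, ih]

theorem foldlB_eq (ls : List String) : ∀ (c : Int),
    ls.foldl (fun cnt w => if bGood w.toList then cnt + 1 else cnt) c
      = c + (ls.countP (fun w => bGood w.toList) : Int) := by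
  induction ls with
  | nil => intro c; simp
  | cons w ls ih =>
    intro c
    by_cases h : bGood w.toList
    · simp [h, ih]; ring
    · simp [h, ih]

theorem countP_split (ls : List String) :
    ls.countP (fun w => bGood w.toList) + ls.countP (fun w => !bGood w.toList) = ls.length := by
  induction ls with
  | nil => simp
  | cons w ls ih =>
    simp only [List.countP_cons, List.length_cons]
    cases h : bGood w.toList <;> simp <;> omega

-- ===== VERDICT (by name: the statement is the Claim_ definition above) =====
theorem solution_spec : Claim_equal_solution := by
  intro ls _
  unfold Spec_solution solution solution_alt
  rw [foldlA_eq, foldlB_eq]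
  have hsplit : ls.countP (fun w => aScan w.toList)
      = ls.countP (fun w => !bGood w.toList) := by
    apply List.countP_congr
    intro w _
    rw [aScan_eq_not_bGood]
  rw [hsplit]
  have := countP_split ls
  omega
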